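-- pv_equiv track=rewrite | github.com/Jaeyeop-Jung/CodingTest | 백준/다이나믹프로그래밍/Top-down/11058.py | dfs
-- ===== SOURCE A (Python) =====
-- def dfs(dp, cur):
--     if cur == 0:
--         return 0
--     if dp[cur]:
--         return dp[cur]
--
--     dp[cur] = max(dp[cur], dfs(dp, cur - 1) + 1)
--     cnt = 2
--     for i in range(3, cur + 1):
--         dp[cur] = max(dp[cur], dp[cur - i] * cnt)
--         cnt += 1
--
--     return dp[cur]
-- ===== SOURCE B (Python) =====
-- def dfs(dp, cur):
--     # Iterative bottom-up version; computes the return value only (does not mutate dp).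
--     if cur == 0:
--         return 0
--     if dp[cur]:
--         return dp[cur]
--     table = list(dp)
--     s = cur - 1
--     while s > 0 and table[s] == 0:
--         s -= 1
--     v = table[s] if s > 0 else 0
--     for j in range(s + 1, cur + 1):
--         v = max(0, v + 1)
--         for i in range(3, j + 1):
--             v = max(v, table[j - i] * (i - 1))
--         table[j] = v
--     return v
-- ===== Notes on version B (the rewrite author's own statement) =====
-- stated objective: alternative
-- what changed: Top-down memoized recursion over dp is replaced by an explicit backward scan for the first already-filled entry followed by an iterative bottom-up fill of the missing range; no recursion and no mutation of the argument (return value only).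
-- outside the precondition, e.g. on dfs([0, 5, 0], -1): A returns 6, B returns 1
import Mathlib
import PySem

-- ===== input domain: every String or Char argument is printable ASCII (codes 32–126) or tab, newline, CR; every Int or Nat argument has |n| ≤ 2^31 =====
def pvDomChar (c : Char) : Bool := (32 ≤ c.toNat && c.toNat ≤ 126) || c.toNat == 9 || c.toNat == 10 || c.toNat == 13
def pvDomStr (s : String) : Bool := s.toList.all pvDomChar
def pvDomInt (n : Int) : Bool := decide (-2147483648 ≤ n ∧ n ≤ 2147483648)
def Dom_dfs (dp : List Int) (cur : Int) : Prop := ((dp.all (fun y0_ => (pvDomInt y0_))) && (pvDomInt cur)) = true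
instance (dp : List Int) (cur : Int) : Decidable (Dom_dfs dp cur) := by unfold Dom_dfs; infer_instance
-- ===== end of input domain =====

-- B replaces A's top-down memoized recursion by a backward scan for the first filled entry plus an
-- iterative bottom-up fill (alternative decomposition); A mutates dp in place, B does not — the
-- equivalence proved here is about the return value only.


-- ===== PORT A =====
-- A threads the mutated list dp as state: dfsImpl returns (final table, value); `none` is Python's
-- IndexError. The loop body 'dp[cur] = max(dp[cur], dp[cur-i]*cnt); cnt += 1' is dfsStep; pyGetD /
-- pySetD are exact here because the corresponding Python reads/writes occur only at in-range indices
-- (cur was successfully read before, and 0 ≤ cur - i for i ≤ cur).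
def dfsStep (cur : Int) (st : List Int × Int) (i : Int) : List Int × Int :=
  (PySem.List.pySetD st.1 cur
      (max (PySem.List.pyGetD st.1 cur 0) (PySem.List.pyGetD st.1 (cur - i) 0 * st.2)),
    st.2 + 1)

def dfsImpl (dp : List Int) (cur : Int) : Option (List Int × Int) :=
  if cur = 0 then some (dp, 0)
  else
    match h : PySem.List.pyGet? dp cur with
    | none => none
    | some v =>
      if v ≠ 0 then some (dp, v)
      else
        match dfsImpl dp (cur - 1) with
        | none => none
        | some st1 =>
          -- 'max(dp[cur], dfs(dp, cur-1) + 1)': dp[cur] is read left to right BEFORE the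
          -- recursive call mutates dp, so its value is the v matched above
          let dp2 := PySem.List.pySetD st1.1 cur (max v (st1.2 + 1))
          let st := (PySem.List.pyRange 3 (cur + 1)).foldl (dfsStep cur) (dp2, 2)
          some (st.1, PySem.List.pyGetD st.1 cur 0)
termination_by (dp.length + cur + 1).toNat
decreasing_by
  have hin : PySem.Raise.InRange dp.length cur := by
    by_contra hc
    rw [← PySem.List.pyGet?_eq_none_iff] at hc
    simp [h] at hc
  obtain ⟨h1, h2⟩ := hin
  omega

def dfs (dp : List Int) (cur : Int) : Int :=
  match dfsImpl dp cur with
  | some st => st.2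
  | none => 0   -- Python raises IndexError here (outside Pre_)

-- ===== PORT B =====
-- 's = cur - 1; while s > 0 and table[s] == 0: s -= 1'
def bScan (dp : List Int) (s : Int) : Int :=
  if h : 0 < s ∧ PySem.List.pyGetD dp s 0 = 0 then bScan dp (s - 1) else s
termination_by s.toNat
decreasing_by omega

-- 'for i in range(3, j + 1): v = max(v, table[j - i] * (i - 1))'
def bInner (table : List Int) (j v : Int) : Int :=
  (PySem.List.pyRange 3 (j + 1)).foldl
    (fun v i => max v (PySem.List.pyGetD table (j - i) 0 * (i - 1))) v

-- body of 'for j in range(s + 1, cur + 1)': state is (table, v)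
def bOuter (st : List Int × Int) (j : Int) : List Int × Int :=
  let v := bInner st.1 j (max 0 (st.2 + 1))
  (PySem.List.pySetD st.1 j v, v)

def dfs_alt (dp : List Int) (cur : Int) : Int :=
  if cur = 0 then 0
  else
    match PySem.List.pyGet? dp cur with
    | none => 0   -- B's Python raises IndexError here (outside Pre_)
    | some v0 =>
      if v0 ≠ 0 then v0
      else
        let s := bScan dp (cur - 1)
        let v := if 0 < s then PySem.List.pyGetD dp s 0 else 0
        ((PySem.List.pyRange (s + 1) (cur + 1)).foldl bOuter (dp, v)).2

-- ===== PRECONDITION & SPEC =====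
-- Pre_ excludes cur ≥ len(dp) (A raises IndexError) and negative cur with dp[cur] == 0, where A
-- either raises IndexError or returns a value produced by negative-index wraparound chaining below
-- the start of the list — an artefact of Python indexing; negative cur with dp[cur] ≠ 0 is kept.
def Pre_dfs (dp : List Int) (cur : Int) : Prop :=
  cur = 0 ∨ (0 < cur ∧ cur < dp.length) ∨
    (-(dp.length : Int) ≤ cur ∧ cur < 0 ∧ PySem.List.pyGetD dp cur 0 ≠ 0)
instance (dp : List Int) (cur : Int) : Decidable (Pre_dfs dp cur) := by
  unfold Pre_dfs; infer_instance

def pvWitness_dfs : List Int × Int := ([0, 0, 0, 0, 0, 0], 5)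

def Spec_dfs (dp : List Int) (cur : Int) (out : Int) : Prop := out = dfs_alt dp cur
instance (dp : List Int) (cur : Int) (out : Int) : Decidable (Spec_dfs dp cur out) := by
  unfold Spec_dfs; infer_instance

-- ===== CLAIM (what is proved, stated in full; the proofs are below) =====
def Claim_equal_dfs : Prop :=
  ∀ (dp : List Int) (cur : Int), Dom_dfs dp cur → Pre_dfs dp cur → Spec_dfs dp cur (dfs dp cur)

-- ===== LEMMAS AND PROOFS =====

-- the pair B's else-branch computes (table after the bottom-up fill, final value)
def BF (dp : List Int) (cur : Int) : List Int × Int :=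
  if cur = 0 then (dp, 0)
  else if PySem.List.pyGetD dp cur 0 ≠ 0 then (dp, PySem.List.pyGetD dp cur 0)
  else
    (PySem.List.pyRange (bScan dp (cur - 1) + 1) (cur + 1)).foldl bOuter
      (dp, if 0 < bScan dp (cur - 1) then PySem.List.pyGetD dp (bScan dp (cur - 1)) 0 else 0)

theorem bScan_le (dp : List Int) (s : Int) : bScan dp s ≤ s := by
  fun_induction bScan dp s with
  | case1 s h ih => omega
  | case2 s h => omega

theorem bScan_stop (dp : List Int) (s : Int) (h : ¬(0 < s ∧ PySem.List.pyGetD dp s 0 = 0)) :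
    bScan dp s = s := by
  rw [bScan]; simp [h]

theorem bScan_step (dp : List Int) (s : Int) (h1 : 0 < s) (h2 : PySem.List.pyGetD dp s 0 = 0) :
    bScan dp s = bScan dp (s - 1) := by
  rw [bScan]; simp [h1, h2]

theorem getD_setD_self (xs : List Int) (i : Int) (v d : Int) (h0 : 0 ≤ i)
    (h1 : i < xs.length) : PySem.List.pyGetD (PySem.List.pySetD xs i v) i d = v := by
  have hi : (i.toNat : Int) = i := Int.toNat_of_nonneg h0
  rw [← hi, PySem.List.pyGetD_pySetD_natCast xs i.toNat i.toNat v d (by omega)]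
  simp

theorem getD_setD_ne (xs : List Int) (i m : Int) (v d : Int) (h0 : 0 ≤ i) (h0m : 0 ≤ m)
    (h1 : i < xs.length) (hne : m ≠ i) :
    PySem.List.pyGetD (PySem.List.pySetD xs i v) m d = PySem.List.pyGetD xs m d := by
  have hi : (i.toNat : Int) = i := Int.toNat_of_nonneg h0
  have hm : (m.toNat : Int) = m := Int.toNat_of_nonneg h0m
  rw [← hi, ← hm, PySem.List.pyGetD_pySetD_natCast xs i.toNat m.toNat v d (by omega)]
  rw [if_neg (by omega)]

theorem setD_setD (xs : List Int) (i : Int) (v w : Int) (h0 : 0 ≤ i) :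
    PySem.List.pySetD (PySem.List.pySetD xs i v) i w = PySem.List.pySetD xs i w := by
  rw [PySem.List.pySetD_of_nonneg xs v h0, PySem.List.pySetD_of_nonneg _ w h0,
    PySem.List.pySetD_of_nonneg xs w h0, List.set_set]

theorem foldl_bOuter_length (js : List Int) (t : List Int) (v : Int) :
    ((js.foldl bOuter (t, v)).1).length = t.length := by
  induction js generalizing t v with
  | nil => rfl
  | cons j js ih =>
    simp only [List.foldl_cons]
    rw [show bOuter (t, v) j = (PySem.List.pySetD t j (bInner t j (max 0 (v + 1))),
      bInner t j (max 0 (v + 1))) from rfl]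
    rw [ih, PySem.List.length_pySetD]

theorem inner_eq (t : List Int) (cur : Int) (h0 : 0 ≤ cur) (hl : cur < t.length) :
    ∀ (k : Nat) (w : Int), 3 + (k : Int) ≤ cur + 1 →
      (PySem.List.pyRange 3 (3 + (k : Int))).foldl (dfsStep cur) (PySem.List.pySetD t cur w, 2)
        = (PySem.List.pySetD t cur
            ((PySem.List.pyRange 3 (3 + (k : Int))).foldl
              (fun v i => max v (PySem.List.pyGetD t (cur - i) 0 * (i - 1))) w),
           2 + (k : Int)) := by
  intro k
  induction k with
  | zero =>
    intro w hk
    rw [PySem.List.pyRange_one_eq_nil (by omega)]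
    simp
  | succ k ih =>
    intro w hk
    have h3 : (3 : Int) + ((k + 1 : Nat) : Int) = (3 + (k : Int)) + 1 := by push_cast; ring
    rw [h3, PySem.List.pyRange_one_succ_right (by omega), List.foldl_append,
      List.foldl_append, ih w (by omega)]
    simp only [List.foldl_cons, List.foldl_nil]
    unfold dfsStep
    rw [getD_setD_self t cur _ 0 h0 hl,
      getD_setD_ne t cur (cur - (3 + (k : Int))) _ 0 h0 (by omega) hl (by omega),
      setD_setD t cur _ _ h0]
    simp only [Prod.mk.injEq]
    constructor
    · congr 2
      ring
    · push_cast; ring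

theorem inner_eq' (t : List Int) (cur : Int) (h0 : 0 ≤ cur) (hl : cur < t.length) (w : Int) :
    ((PySem.List.pyRange 3 (cur + 1)).foldl (dfsStep cur) (PySem.List.pySetD t cur w, 2)).1
      = PySem.List.pySetD t cur (bInner t cur w) := by
  unfold bInner
  by_cases hc : cur + 1 ≤ 3
  · rw [PySem.List.pyRange_one_eq_nil hc]
    simp
  · have h3 : (3 : Int) + (((cur - 2).toNat : Nat) : Int) = cur + 1 := by omega
    rw [← h3, inner_eq t cur h0 hl (cur - 2).toNat w (by omega)]

theorem BF_length (dp : List Int) (cur : Int) : ((BF dp cur).1).length = dp.length := by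
  unfold BF
  split_ifs <;> first | rfl | exact foldl_bOuter_length _ _ _

theorem BF_succ (dp : List Int) (cur : Int) (hc : 0 < cur)
    (hz : PySem.List.pyGetD dp cur 0 = 0) :
    BF dp cur = bOuter (BF dp (cur - 1)) cur := by
  have e1 : BF dp cur = (PySem.List.pyRange (bScan dp (cur - 1) + 1) (cur + 1)).foldl bOuter
      (dp, if 0 < bScan dp (cur - 1) then PySem.List.pyGetD dp (bScan dp (cur - 1)) 0 else 0) := by
    rw [BF, if_neg (by omega), if_neg (by simp [hz])]
  by_cases hrec : 0 < cur - 1 ∧ PySem.List.pyGetD dp (cur - 1) 0 = 0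
  · -- the scan walks past cur - 1; B's fill range at cur extends the one at cur - 1 by [cur]
    have hs : bScan dp (cur - 1) = bScan dp (cur - 1 - 1) := bScan_step dp (cur - 1) hrec.1 hrec.2
    have hle : bScan dp (cur - 1 - 1) ≤ cur - 1 - 1 := bScan_le dp (cur - 1 - 1)
    have e2 : BF dp (cur - 1) = (PySem.List.pyRange (bScan dp (cur - 1 - 1) + 1) cur).foldl bOuter
        (dp, if 0 < bScan dp (cur - 1 - 1) then
          PySem.List.pyGetD dp (bScan dp (cur - 1 - 1)) 0 else 0) := by
      rw [BF, if_neg (by omega), if_neg (by simp [hrec.2])]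
      have h11 : cur - 1 + 1 = cur := by ring
      rw [h11]
    rw [e1, e2, hs,
      PySem.List.pyRange_one_append (bScan dp (cur - 1 - 1) + 1) cur (cur + 1)
        (by omega) (by omega),
      List.foldl_append, PySem.List.pyRange_one_singleton]
    rfl
  · -- the scan stops at cur - 1 immediately
    have hs : bScan dp (cur - 1) = cur - 1 := bScan_stop dp (cur - 1) hrec
    have hr : PySem.List.pyRange (cur - 1 + 1) (cur + 1) = [cur] := by
      have h11 : cur - 1 + 1 = cur := by ring
      rw [h11, PySem.List.pyRange_one_singleton]
    by_cases h1 : cur - 1 = 0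
    · have e2 : BF dp (cur - 1) = (dp, 0) := by rw [BF, if_pos h1]
      rw [e1, e2, hs, if_neg (by omega), hr]
      rfl
    · have hnz : PySem.List.pyGetD dp (cur - 1) 0 ≠ 0 := by
        rcases not_and_or.mp hrec with h | h
        · omega
        · exact h
      have e2 : BF dp (cur - 1) = (dp, PySem.List.pyGetD dp (cur - 1) 0) := by
        rw [BF, if_neg h1, if_pos (by simp [hnz])]
      rw [e1, e2, hs, if_pos (by omega), hr]
      rfl

theorem main_eq (dp : List Int) : ∀ (n : Nat) (cur : Int), cur = (n : Int) →
    cur < dp.length → dfsImpl dp cur = some (BF dp cur) := by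
  intro n
  induction n with
  | zero =>
    intro cur hc _
    subst hc
    rw [dfsImpl, BF]
    simp
  | succ n ih =>
    intro cur hc hl
    have hpos : 0 < cur := by omega
    have hg : PySem.List.pyGet? dp cur = some dp[cur.toNat] :=
      PySem.List.pyGet?_eq_some_getElem dp (by omega) hl
    have hgd : PySem.List.pyGetD dp cur 0 = dp[cur.toNat] := by
      simp [PySem.List.pyGetD, hg]
    rw [dfsImpl, if_neg (by omega)]
    split
    · next heq => rw [hg] at heq; cases heq
    · next v heq =>
      rw [hg] at heq
      injection heq with hveq
      subst hveq
      by_cases hv : dp[cur.toNat] = 0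
      · rw [if_neg (by simp [hv])]
        have hrec : dfsImpl dp (cur - 1) = some (BF dp (cur - 1)) :=
          ih (cur - 1) (by omega) (by omega)
        rw [hrec]
        have hl1 : cur < ((BF dp (cur - 1)).1).length := by rw [BF_length]; exact hl
        rw [BF_succ dp cur hpos (hgd.trans hv)]
        simp only [bOuter, hv]
        have hst := inner_eq' (BF dp (cur - 1)).1 cur (by omega) hl1
          (max 0 ((BF dp (cur - 1)).2 + 1))
        rw [Option.some.injEq, Prod.mk.injEq]
        refine ⟨hst, ?_⟩
        rw [hst]
        exact getD_setD_self _ cur _ 0 (by omega) hl1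
      · rw [if_pos (by simp [hv])]
        rw [BF, if_neg (by omega), if_pos (by rw [hgd]; exact hv), hgd]

theorem alt_eq (dp : List Int) (cur : Int) (h0 : 0 ≤ cur) (hl : cur < dp.length) :
    dfs_alt dp cur = (BF dp cur).2 := by
  rw [dfs_alt, BF]
  by_cases hc : cur = 0
  · simp [hc]
  · have hg : PySem.List.pyGet? dp cur = some dp[cur.toNat] :=
      PySem.List.pyGet?_eq_some_getElem dp h0 hl
    have hgd : PySem.List.pyGetD dp cur 0 = dp[cur.toNat] := by
      simp [PySem.List.pyGetD, hg]
    rw [if_neg hc, if_neg hc]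
    simp only [hg, hgd]
    by_cases hv : dp[cur.toNat] = 0
    · simp [hv]
    · simp [hv]

-- ===== VERDICT (by name: the statement is the Claim_ definition above) =====
theorem dfs_spec : Claim_equal_dfs := by
  intro dp cur _ hpre
  show dfs dp cur = dfs_alt dp cur
  rcases hpre with hz | ⟨h1, h2⟩ | ⟨hge, hlt, hnz⟩
  · subst hz
    rw [dfs, dfsImpl, dfs_alt]
    simp
  · rw [dfs, main_eq dp cur.toNat cur (by omega) h2, alt_eq dp cur (by omega) h2]
  · cases hg : PySem.List.pyGet? dp cur with
    | none =>
      rw [PySem.List.pyGet?_eq_none_iff] at hg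
      exact absurd ⟨hge, by omega⟩ hg
    | some g =>
      have hgd : PySem.List.pyGetD dp cur 0 = g := by simp [PySem.List.pyGetD, hg]
      have hgz : g ≠ 0 := hgd ▸ hnz
      have himpl : dfsImpl dp cur = some (dp, g) := by
        rw [dfsImpl, if_neg (by omega)]
        split
        · next heq => rw [hg] at heq; cases heq
        · next v heq =>
          rw [hg] at heq
          injection heq with hveq
          subst hveq
          rw [if_pos hgz]
      rw [dfs, himpl, dfs_alt, if_neg (by omega)]
      simp [hg, hgz]
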